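-- pv_equiv track=rewrite | github.com/rae-men/sling | merge_preview.py | trim_trinity_inline_style
-- ===== SOURCE A (Python) =====
-- def trim_trinity_inline_style(style_inner: str) -> str:
--     """Keep only #menu4-3 section08 rules and @media entries that reference section08."""
--     lines = style_inner.splitlines()
--     kept = []
--     i = 0
--     while i < len(lines):
--         line = lines[i]
--         stripped = line.strip()
--         if stripped.startswith("@media"):
--             header = line
--             i += 1
--             block = []
--             while i < len(lines) and lines[i].strip() != "}":
--                 if "menu4-3-section08" in lines[i]:
--                     block.append(lines[i])
--                 i += 1
--             closer = lines[i] if i < len(lines) else "  }"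
--             if block:
--                 kept.append(header)
--                 kept.extend(block)
--                 kept.append(closer)
--             if i < len(lines):
--                 i += 1
--             continue
--         if "menu4-3-section08" in line:
--             kept.append(line)
--         i += 1
--     return "\n".join(kept)
-- ===== SOURCE B (Python) =====
-- NEEDLE = "menu4-3-section08"
--
--
-- def _parse_units(lines):
--     """First pass: split lines into units — ('plain', line) or
--     ('media', header, interior_lines, closer)."""
--     units = []
--     n = len(lines)
--     idx = 0
--     while idx < n:
--         line = lines[idx]
--         if line.strip().startswith("@media"):
--             header = line
--             idx += 1
--             interior = []
--             while idx < n and lines[idx].strip() != "}":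
--                 interior.append(lines[idx])
--                 idx += 1
--             if idx < n:
--                 closer = lines[idx]
--                 idx += 1
--             else:
--                 closer = "  }"
--             units.append(("media", header, interior, closer))
--         else:
--             units.append(("plain", line))
--             idx += 1
--     return units
--
--
-- def _render_unit(unit):
--     """Second pass: render one unit to its kept lines."""
--     if unit[0] == "plain":
--         return [unit[1]] if NEEDLE in unit[1] else []
--     _, header, interior, closer = unit
--     body = [l for l in interior if NEEDLE in l]
--     if not body:
--         return []
--     return [header] + body + [closer]
--
--
-- def trim_trinity_inline_style(style_inner: str) -> str:
--     units = _parse_units(style_inner.splitlines())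
--     out = []
--     for u in units:
--         out.extend(_render_unit(u))
--     return "\n".join(out)
-- ===== Notes on version B (the rewrite author's own statement) =====
-- stated objective: alternative
-- what changed: A's single fused while-loop that filters @media interiors while scanning is replaced by a two-phase design: a parser that builds plain-line / media-block units (header, unfiltered interior, closer), and a renderer that filters each unit and emits it only if non-empty.
import Mathlib
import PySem

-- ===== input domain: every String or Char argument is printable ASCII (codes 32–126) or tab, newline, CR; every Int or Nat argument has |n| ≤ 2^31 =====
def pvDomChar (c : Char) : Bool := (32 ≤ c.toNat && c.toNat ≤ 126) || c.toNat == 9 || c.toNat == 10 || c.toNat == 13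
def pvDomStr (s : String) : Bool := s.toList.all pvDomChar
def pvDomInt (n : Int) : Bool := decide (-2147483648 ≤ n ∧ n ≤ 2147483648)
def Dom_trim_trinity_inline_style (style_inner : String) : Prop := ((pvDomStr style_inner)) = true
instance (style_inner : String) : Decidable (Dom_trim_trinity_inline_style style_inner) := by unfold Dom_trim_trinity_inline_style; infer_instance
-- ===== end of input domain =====

-- B rewrites A's fused flag-style scan as parse (units) + render (filter each unit); same output, alternative decomposition.

-- ===== PORT A =====
-- A's inner while loop: scan until a line strips to "}", collecting matching lines;
-- returns (block, remaining lines starting at the closer if any).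
def pvInnerA : List String → List String × List String
  | [] => ([], [])
  | x :: xs =>
    if PySem.Str.strip x == "}" then ([], x :: xs)
    else
      let p := pvInnerA xs
      (if PySem.Str.isIn "menu4-3-section08" x then x :: p.1 else p.1, p.2)

theorem pvInnerA_len : ∀ (xs : List String), (pvInnerA xs).2.length ≤ xs.length
  | [] => Nat.le_refl 0
  | x :: xs => by
    simp only [pvInnerA]
    split
    · simp
    · exact Nat.le_succ_of_le (pvInnerA_len xs)

-- A's outer while loop over the remaining lines; the closer is `lines[i] if i < len(lines)
-- else "  }"` (= headD), and the conditional `i += 1` before `continue` is `tail`.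
def pvGoA : List String → List String
  | [] => []
  | l :: rest =>
    if PySem.Str.startswith (PySem.Str.strip l) "@media" then
      let p := pvInnerA rest
      (if p.1 ≠ [] then l :: p.1 ++ [p.2.headD "  }"] else []) ++ pvGoA p.2.tail
    else
      (if PySem.Str.isIn "menu4-3-section08" l then [l] else []) ++ pvGoA rest
termination_by xs => xs.length
decreasing_by
  · have h := pvInnerA_len rest
    simp only [List.length_cons, List.length_tail]
    omega
  · simp

def trim_trinity_inline_style (style_inner : String) : String :=
  PySem.Str.join "\n" (pvGoA (PySem.Str.splitlines style_inner))

-- ===== PORT B =====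
-- B's units: a plain line, or a media block (header, interior lines, closer).
inductive PvUnit where
  | plain : String → PvUnit
  | media : String → List String → String → PvUnit

-- split off the interior lines before the first line stripping to "}" (no filtering here)
def pvSplitCloser : List String → List String × List String
  | [] => ([], [])
  | x :: xs =>
    if PySem.Str.strip x == "}" then ([], x :: xs)
    else
      let p := pvSplitCloser xs
      (x :: p.1, p.2)

theorem pvSplitCloser_len : ∀ (xs : List String), (pvSplitCloser xs).2.length ≤ xs.length
  | [] => Nat.le_refl 0
  | x :: xs => by
    simp only [pvSplitCloser]
    split
    · simp
    · exact Nat.le_succ_of_le (pvSplitCloser_len xs)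

-- first pass: parse the lines into units (closer defaults to "  }" at EOF, as in Source B)
def pvParse : List String → List PvUnit
  | [] => []
  | l :: rest =>
    if PySem.Str.startswith (PySem.Str.strip l) "@media" then
      let p := pvSplitCloser rest
      PvUnit.media l p.1 (p.2.headD "  }") :: pvParse p.2.tail
    else
      PvUnit.plain l :: pvParse rest
termination_by xs => xs.length
decreasing_by
  · have h := pvSplitCloser_len rest
    simp only [List.length_cons, List.length_tail]
    omega
  · simp

-- second pass: render one unit to its kept lines
def pvRender : PvUnit → List String
  | PvUnit.plain l => if PySem.Str.isIn "menu4-3-section08" l then [l] else []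
  | PvUnit.media h inner c =>
    let body := inner.filter (fun x => PySem.Str.isIn "menu4-3-section08" x)
    if body = [] then [] else h :: body ++ [c]

def trim_trinity_inline_style_alt (style_inner : String) : String :=
  PySem.Str.join "\n"
    ((pvParse (PySem.Str.splitlines style_inner)).foldl (fun acc u => acc ++ pvRender u) [])

-- ===== PRECONDITION & SPEC =====
def Spec_trim_trinity_inline_style (style_inner : String) (out : String) : Prop := out = trim_trinity_inline_style_alt style_inner
instance (style_inner : String) (out : String) : Decidable (Spec_trim_trinity_inline_style style_inner out) := by unfold Spec_trim_trinity_inline_style; infer_instance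

-- ===== CLAIM (what is proved, stated in full; the proofs are below) =====
def Claim_equal_trim_trinity_inline_style : Prop := ∀ (style_inner : String), Dom_trim_trinity_inline_style style_inner → Spec_trim_trinity_inline_style style_inner (trim_trinity_inline_style style_inner)

-- ===== LEMMAS AND PROOFS =====

-- A's fused scan is B's split followed by a filter
theorem pvInnerA_eq : ∀ (xs : List String),
    pvInnerA xs = ((pvSplitCloser xs).1.filter (fun x => PySem.Str.isIn "menu4-3-section08" x), (pvSplitCloser xs).2)
  | [] => rfl
  | x :: xs => by
    simp only [pvInnerA, pvSplitCloser]
    split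
    · rfl
    · rw [pvInnerA_eq xs]
      simp [List.filter]
      split <;> simp_all

theorem pvGoA_eq_flatMap : ∀ (xs : List String), pvGoA xs = (pvParse xs).flatMap pvRender
  | [] => by simp [pvGoA, pvParse]
  | l :: rest => by
    by_cases h : PySem.Str.startswith (PySem.Str.strip l) "@media" = true
    · have ih := pvGoA_eq_flatMap (pvSplitCloser rest).2.tail
      rw [pvGoA, pvParse]
      simp only [if_pos h, pvInnerA_eq rest, List.flatMap_cons, pvRender, ih]
      split <;> simp_all
    · have ih := pvGoA_eq_flatMap rest
      rw [pvGoA, pvParse]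
      simp only [if_neg h, List.flatMap_cons]
      rw [ih]
      simp [pvRender]
termination_by xs => xs.length
decreasing_by
  · have hl := pvSplitCloser_len rest
    simp only [List.length_cons, List.length_tail]
    omega
  · simp

-- ===== VERDICT (by name: the statement is the Claim_ definition above) =====
theorem trim_trinity_inline_style_spec : Claim_equal_trim_trinity_inline_style := by
  intro s _
  unfold Spec_trim_trinity_inline_style trim_trinity_inline_style trim_trinity_inline_style_alt
  rw [pvGoA_eq_flatMap, PySem.List.foldl_append_eq_flatMap, List.nil_append]
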